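-- pv_equiv track=rewrite | github.com/dmadrazo/Sent_Analysis_Tlalpan-app | streamlit_app.py | bing_sentiment_analysis
-- ===== SOURCE A (Python) =====
-- def bing_sentiment_analysis(text):
--     bing_positive = {'bueno', 'feliz', 'genial', 'positivo', 'agradable'}
--     bing_negative = {'malo', 'triste', 'horrible', 'negativo', 'terrible'}
--
--     words = text.split()
--     positive_score = sum(1 for word in words if word.lower() in bing_positive)
--     negative_score = sum(1 for word in words if word.lower() in bing_negative)
--
--     sentiment = 'Neutral'
--     if positive_score > negative_score:
--         sentiment = 'Positive'
--     elif negative_score > positive_score: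
--         sentiment = 'Negative'
--
--     return sentiment
-- ===== SOURCE B (Python) =====
-- def bing_sentiment_analysis(text):
--     positive = ('bueno', 'feliz', 'genial', 'positivo', 'agradable')
--     negative = ('malo', 'triste', 'horrible', 'negativo', 'terrible')
--     delta = 0
--     for word in text.split():
--         w = word.lower()
--         if w in positive:
--             delta += 1
--         elif w in negative:
--             delta -= 1
--     if delta > 0:
--         return 'Positive'
--     if delta < 0:
--         return 'Negative'
--     return 'Neutral'
-- ===== Notes on version B (the rewrite author's own statement) =====
-- stated objective: alternative
-- what changed: B makes a single pass over the words with one signed accumulator (+1 for a positive word, -1 for a negative one, the vocabularies are disjoint) and decides by the sign of the total, instead of A's two separate membership-count scans compared at the end.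
import Mathlib
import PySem

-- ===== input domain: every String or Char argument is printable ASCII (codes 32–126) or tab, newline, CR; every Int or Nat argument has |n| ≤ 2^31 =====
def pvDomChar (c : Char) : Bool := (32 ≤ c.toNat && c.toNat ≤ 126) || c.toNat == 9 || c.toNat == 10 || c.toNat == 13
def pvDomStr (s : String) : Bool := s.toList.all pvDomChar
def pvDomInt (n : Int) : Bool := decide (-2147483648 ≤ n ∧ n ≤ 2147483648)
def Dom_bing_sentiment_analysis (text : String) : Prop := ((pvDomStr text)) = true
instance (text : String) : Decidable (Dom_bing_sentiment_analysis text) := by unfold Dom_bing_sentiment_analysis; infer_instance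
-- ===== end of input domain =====

-- B replaces A's two separate membership-count scans by one pass with a single
-- signed accumulator (+1 positive word, -1 negative word; the vocabularies are
-- disjoint) decided by its sign (alternative decomposition, same cost).


-- ===== PORT A =====
def bing_sentiment_analysis (text : String) : String :=
  let bing_positive : PySem.Set String := PySem.Set.ofList ["bueno", "feliz", "genial", "positivo", "agradable"]
  let bing_negative : PySem.Set String := PySem.Set.ofList ["malo", "triste", "horrible", "negativo", "terrible"]
  let words := PySem.Str.split₀ text
  let positive_score : Int :=
    words.foldl (fun acc word => if PySem.Set.contains bing_positive (PySem.Str.lower word) then acc + 1 else acc) 0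
  let negative_score : Int :=
    words.foldl (fun acc word => if PySem.Set.contains bing_negative (PySem.Str.lower word) then acc + 1 else acc) 0
  if positive_score > negative_score then "Positive"
  else if negative_score > positive_score then "Negative"
  else "Neutral"

-- ===== PORT B =====
-- the 'for' loop of Source B: explicit recursion over the remaining words carrying delta
def pvDeltaLoop (positive negative : List String) : Int → List String → Int
  | delta, [] => delta
  | delta, word :: rest =>
    let w := PySem.Str.lower word
    if positive.contains w then pvDeltaLoop positive negative (delta + 1) rest
    else if negative.contains w then pvDeltaLoop positive negative (delta - 1) rest
    else pvDeltaLoop positive negative delta rest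

def bing_sentiment_analysis_alt (text : String) : String :=
  let positive : List String := ["bueno", "feliz", "genial", "positivo", "agradable"]
  let negative : List String := ["malo", "triste", "horrible", "negativo", "terrible"]
  let delta := pvDeltaLoop positive negative 0 (PySem.Str.split₀ text)
  if delta > 0 then "Positive"
  else if delta < 0 then "Negative"
  else "Neutral"

-- ===== PRECONDITION & SPEC =====
def Spec_bing_sentiment_analysis (text : String) (out : String) : Prop := out = bing_sentiment_analysis_alt text
instance (text : String) (out : String) : Decidable (Spec_bing_sentiment_analysis text out) := by unfold Spec_bing_sentiment_analysis; infer_instance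

-- ===== CLAIM (what is proved, stated in full; the proofs are below) =====
def Claim_equal_bing_sentiment_analysis : Prop := ∀ (text : String), Dom_bing_sentiment_analysis text → Spec_bing_sentiment_analysis text (bing_sentiment_analysis text)

-- ===== LEMMAS AND PROOFS =====

-- A's counting fold equals acc + (countP of the test), over Int
theorem foldl_count (p : String → Bool) (ws : List String) :
    ∀ (acc : Int),
      ws.foldl (fun a w => if p w then a + 1 else a) acc
        = acc + (ws.countP p : Int) := by
  induction ws with
  | nil => intro acc; simp
  | cons w rest ih =>
    intro acc
    simp only [List.foldl_cons, List.countP_cons, ih]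
    by_cases h : p w = true <;> simp [h] <;> push_cast <;> ring

-- B's signed loop computes acc + positive-count - negative-count,
-- provided no word tests positive and negative at once
theorem deltaLoop_eq (pos neg : List String)
    (hdisj : ∀ v, pos.contains v = true → neg.contains v = false)
    (ws : List String) :
    ∀ (acc : Int),
      pvDeltaLoop pos neg acc ws
        = acc + (ws.countP (fun w => pos.contains (PySem.Str.lower w)) : Int)
            - (ws.countP (fun w => neg.contains (PySem.Str.lower w)) : Int) := by
  induction ws with
  | nil => intro acc; simp [pvDeltaLoop]
  | cons w rest ih =>
    intro acc
    by_cases hp : pos.contains (PySem.Str.lower w) = true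
    · have hn := hdisj _ hp
      simp only [pvDeltaLoop, hp, if_true, ih, List.countP_cons, hp, hn]
      push_cast; ring
    · by_cases hn : neg.contains (PySem.Str.lower w) = true
      · simp only [pvDeltaLoop, hp, if_false, hn, if_true, ih, List.countP_cons]
        simp [hp, hn]; push_cast; ring
      · simp only [pvDeltaLoop, hp, hn, if_false, ih, List.countP_cons]
        simp [hp, hn]

-- the two literal vocabularies are disjoint
theorem vocab_disjoint (v : String) :
    (["bueno", "feliz", "genial", "positivo", "agradable"] : List String).contains v = true →
    (["malo", "triste", "horrible", "negativo", "terrible"] : List String).contains v = false := by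
  intro h
  simp only [List.contains_cons, List.contains_nil, Bool.or_false, Bool.or_eq_true, beq_iff_eq] at h
  rcases h with h | h | h | h | h <;> subst h <;> decide

-- A's set-membership test is plain list membership (the literals are distinct)
theorem setContains_pos (v : String) :
    PySem.Set.contains (PySem.Set.ofList ["bueno", "feliz", "genial", "positivo", "agradable"]) v
      = (["bueno", "feliz", "genial", "positivo", "agradable"] : List String).contains v := by
  rw [PySem.Set.contains_eq_listContains,
    PySem.Set.ofList_eq_self_of_nodup _ (by decide)]

theorem setContains_neg (v : String) :
    PySem.Set.contains (PySem.Set.ofList ["malo", "triste", "horrible", "negativo", "terrible"]) v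
      = (["malo", "triste", "horrible", "negativo", "terrible"] : List String).contains v := by
  rw [PySem.Set.contains_eq_listContains,
    PySem.Set.ofList_eq_self_of_nodup _ (by decide)]

-- ===== VERDICT (by name: the statement is the Claim_ definition above) =====
theorem bing_sentiment_analysis_spec : Claim_equal_bing_sentiment_analysis := by
  intro text _
  unfold Spec_bing_sentiment_analysis bing_sentiment_analysis bing_sentiment_analysis_alt
  simp only [setContains_pos, setContains_neg,
    foldl_count (fun w => (["bueno", "feliz", "genial", "positivo", "agradable"] : List String).contains (PySem.Str.lower w)),
    foldl_count (fun w => (["malo", "triste", "horrible", "negativo", "terrible"] : List String).contains (PySem.Str.lower w)),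
    deltaLoop_eq _ _ vocab_disjoint]
  set cp := (PySem.Str.split₀ text).countP (fun w => (["bueno", "feliz", "genial", "positivo", "agradable"] : List String).contains (PySem.Str.lower w))
  set cn := (PySem.Str.split₀ text).countP (fun w => (["malo", "triste", "horrible", "negativo", "terrible"] : List String).contains (PySem.Str.lower w))
  split_ifs <;> first | rfl | omega
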